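-- pv_equiv track=rewrite | github.com/leehj01/Study_CodingTest | programmers/210309_스택큐_주식가격.py | solution
-- ===== SOURCE A (Python) =====
-- def solution(prices):
--     answer =[]
--
--     for i, v in enumerate(prices):
--         cnt = -1
--         for j, x in enumerate(prices):
--             if v <= x and i <= j :
--                 cnt += 1
--             else :
--                 cnt += 0
--
--         answer.append(cnt)
--     return answer
-- ===== SOURCE B (Python) =====
-- def solution(prices):
--     # Right-to-left sweep keeping a sorted list of the suffix seen so far;
--     # a hand-rolled binary search (bisect_left) counts elements >= current price.
--     answer = []
--     seen = []  # sorted ascending multiset of prices to the right of the current one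
--     for v in reversed(prices):
--         lo, hi = 0, len(seen)
--         while lo < hi:
--             mid = (lo + hi) // 2
--             if seen[mid] < v:
--                 lo = mid + 1
--             else:
--                 hi = mid
--         answer.append(len(seen) - lo)
--         seen.insert(lo, v)
--     answer.reverse()
--     return answer
-- ===== Notes on version B (the rewrite author's own statement) =====
-- stated objective: faster
-- what changed: Replaced the full O(n^2) double scan (for each index, re-scan the whole list) by a single right-to-left sweep that maintains a sorted list of the suffix and binary-searches (bisect_left) the count of elements >= the current price.
import Mathlib
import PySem

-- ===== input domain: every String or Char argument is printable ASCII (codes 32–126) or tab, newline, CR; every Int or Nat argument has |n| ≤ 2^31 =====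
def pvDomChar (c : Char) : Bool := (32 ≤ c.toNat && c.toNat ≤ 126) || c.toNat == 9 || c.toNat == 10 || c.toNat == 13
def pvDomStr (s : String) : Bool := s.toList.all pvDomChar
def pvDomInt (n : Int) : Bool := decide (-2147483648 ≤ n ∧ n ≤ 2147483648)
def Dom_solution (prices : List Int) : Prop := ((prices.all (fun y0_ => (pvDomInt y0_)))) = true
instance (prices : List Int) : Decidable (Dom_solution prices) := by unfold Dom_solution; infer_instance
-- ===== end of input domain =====

-- B replaces A's full O(n^2) double scan by a right-to-left sweep with a sorted list and a
-- hand-written binary search (objective: faster; measured asymptotically faster).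


-- ===== PORT A =====
-- literal port of A: for each (i, v) in enumerate(prices), an inner full scan over
-- enumerate(prices) adds 1 when v <= x and i <= j (cnt starts at -1), appending cnt.
def solution (prices : List Int) : List Int :=
  (PySem.List.enumerate prices 0).foldl
    (fun answer iv =>
      let cnt := (PySem.List.enumerate prices 0).foldl
        (fun cnt jx => if iv.2 ≤ jx.2 ∧ iv.1 ≤ jx.1 then cnt + 1 else cnt + 0)
        (-1 : Int)
      answer ++ [cnt]) []

-- ===== PORT B =====
-- Source B's hand-written lower-bound binary search (its while-loop, as a recursion on hi - lo);
-- seen[mid] always has 0 ≤ mid < hi ≤ len(seen), so getD is exact for Python's seen[mid].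
def lowerBound (seen : List Int) (v : Int) (lo hi : Nat) : Nat :=
  if _h : lo < hi then
    if seen.getD ((lo + hi) / 2) 0 < v then lowerBound seen v ((lo + hi) / 2 + 1) hi
    else lowerBound seen v lo ((lo + hi) / 2)
  else lo
termination_by hi - lo
decreasing_by all_goals omega

-- port of B: fold over reversed prices, state = (answer, sorted seen); append len(seen) - lo,
-- insert v at lo (0 ≤ lo ≤ len(seen), so List.insertIdx is exact for Python's list.insert);
-- final answer.reverse().
def solution_alt (prices : List Int) : List Int :=
  (prices.reverse.foldl
    (fun st v =>
      let lo := lowerBound st.2 v 0 st.2.length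
      (st.1 ++ [(st.2.length : Int) - (lo : Int)], st.2.insertIdx lo v))
    (([], []) : List Int × List Int)).1.reverse

-- ===== PRECONDITION & SPEC =====
def Spec_solution (prices : List Int) (out : List Int) : Prop := out = solution_alt prices
instance (prices : List Int) (out : List Int) : Decidable (Spec_solution prices out) := by unfold Spec_solution; infer_instance

-- ===== CLAIM (what is proved, stated in full; the proofs are below) =====
def Claim_equal_solution : Prop := ∀ (prices : List Int), Dom_solution prices → Spec_solution prices (solution prices)

-- ===== LEMMAS AND PROOFS =====

-- the common specification: answer[i] = #{ j > i | prices[i] ≤ prices[j] }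
def specFn : List Int → List Int
  | [] => []
  | v :: t => ((t.countP (fun x => decide (v ≤ x)) : Int)) :: specFn t

-- the answers B produces from a multiset `seen` of already-processed elements
def resFn : List Int → List Int → List Int
  | _, [] => []
  | seen, v :: t => ((seen.countP (fun x => decide (v ≤ x)) : Int)) :: resFn (v :: seen) t

-- In a nondecreasing list, the elements < v are exactly the first countP (· < v) ones.
theorem sorted_lt_iff (l : List Int) (v : Int) (hs : l.Pairwise (fun a b => a ≤ b))
    (j : Nat) (hj : j < l.length) :
    l[j] < v ↔ j < l.countP (fun x => decide (x < v)) := by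
  induction l generalizing j with
  | nil => simp at hj
  | cons a t ih =>
    have hs' := hs.of_cons
    by_cases ha : a < v
    · have hc : (a :: t).countP (fun x => decide (x < v)) = t.countP (fun x => decide (x < v)) + 1 := by
        simp [ha]
      cases j with
      | zero => simpa [hc] using ha
      | succ m =>
        have hm : m < t.length := by simpa using hj
        simp only [List.getElem_cons_succ, hc]
        rw [ih hs' m hm]
        omega
    · have hall : ∀ x ∈ t, ¬ x < v := by
        intro x hx hxv
        exact ha (lt_of_le_of_lt (List.rel_of_pairwise_cons hs hx) hxv)
      have hc : (a :: t).countP (fun x => decide (x < v)) = 0 := by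
        rw [List.countP_eq_zero]
        intro x hx
        cases hx with
        | head => simpa using ha
        | tail _ h => simpa using hall x h
      rw [hc]
      simp only [Nat.not_lt_zero, iff_false, not_lt]
      cases j with
      | zero => simpa using not_lt.mp ha
      | succ m =>
        have hm : m < t.length := by simpa using hj
        simpa using not_lt.mp (hall t[m] (by simp))

-- the binary search computes countP (· < v) on a nondecreasing list
theorem lowerBound_eq (l : List Int) (v : Int) (hs : l.Pairwise (fun a b => a ≤ b))
    (lo hi : Nat) (h1 : lo ≤ l.countP (fun x => decide (x < v)))
    (h2 : l.countP (fun x => decide (x < v)) ≤ hi) (h3 : hi ≤ l.length) :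
    lowerBound l v lo hi = l.countP (fun x => decide (x < v)) := by
  fun_induction lowerBound l v lo hi with
  | case1 lo hi hlt hmid ih =>
    have hm : (lo + hi) / 2 < l.length := by omega
    rw [List.getD_eq_getElem l 0 hm] at hmid
    have := (sorted_lt_iff l v hs _ hm).mp hmid
    exact ih (by omega) h2 h3
  | case2 lo hi hlt hmid ih =>
    have hm : (lo + hi) / 2 < l.length := by omega
    rw [List.getD_eq_getElem l 0 hm] at hmid
    have : ¬ (lo + hi) / 2 < l.countP (fun x => decide (x < v)) :=
      fun hc => hmid ((sorted_lt_iff l v hs _ hm).mpr hc)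
    exact ih h1 (by omega) (by omega)
  | case3 lo hi hge => omega

theorem insertIdx_take_drop (l : List Int) (n : Nat) (a : Int) (hle : n ≤ l.length) :
    l.insertIdx n a = l.take n ++ a :: l.drop n := by
  induction l generalizing n with
  | nil => simp at hle; subst hle; simp
  | cons x t ih =>
    cases n with
    | zero => simp
    | succ m => simp [List.insertIdx_succ_cons, ih m (by simpa using hle)]

-- inserting v at countP (· < v) keeps the list nondecreasing
theorem insertIdx_sorted (l : List Int) (v : Int) (hs : l.Pairwise (fun a b => a ≤ b)) :
    (l.insertIdx (l.countP (fun x => decide (x < v))) v).Pairwise (fun a b => a ≤ b) := by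
  set t := l.countP (fun x => decide (x < v)) with ht
  have htl : t ≤ l.length := List.countP_le_length
  rw [insertIdx_take_drop l t v htl, List.pairwise_append]
  refine ⟨hs.take, ?_, ?_⟩
  · constructor
    · intro b hb
      rw [List.mem_drop_iff_getElem] at hb
      obtain ⟨j, hj, rfl⟩ := hb
      have : ¬ l[t + j] < v := by
        rw [sorted_lt_iff l v hs _ (by omega)]; omega
      omega
    · exact hs.drop
  · intro a ha b hb
    rw [List.mem_take_iff_getElem] at ha
    obtain ⟨j, hj, rfl⟩ := ha
    have hjt : j < t := by omega
    have hav : l[j] < v := (sorted_lt_iff l v hs j (by omega)).mpr hjt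
    cases hb with
    | head => omega
    | tail _ hb =>
      rw [show List.Mem b (List.drop t l) ↔ b ∈ List.drop t l from Iff.rfl,
        List.mem_drop_iff_getElem] at hb
      obtain ⟨k, hk, rfl⟩ := hb
      have : ¬ l[t + k] < v := by
        rw [sorted_lt_iff l v hs _ (by omega)]; omega
      omega

-- B's answers depend on `seen` only through its multiset
theorem resFn_perm (l : List Int) : ∀ seen seen' : List Int, seen.Perm seen' →
    resFn seen l = resFn seen' l := by
  induction l with
  | nil => intro _ _ _; rfl
  | cons v t ih =>
    intro seen seen' hp
    simp only [resFn]
    rw [hp.countP_congr (fun x _ => rfl), ih (v :: seen) (v :: seen') (hp.cons v)]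

-- len(seen) - bisect_left(seen, v)  =  #{ x ∈ seen | v ≤ x }
theorem count_ge_eq (l : List Int) (v : Int) :
    (l.length : Int) - (l.countP (fun x => decide (x < v)) : Int) =
      (l.countP (fun x => decide (v ≤ x)) : Int) := by
  have h := List.length_eq_countP_add_countP (fun x : Int => decide (x < v)) (l := l)
  have h2 : l.countP (fun x => decide ¬(decide (x < v)) = true) = l.countP (fun x => decide (v ≤ x)) := by
    apply List.countP_congr
    intro x _
    simp [not_lt]
  omega

-- B's loop invariant: starting from a sorted `seen`, the fold appends resFn seen l
theorem foldl_fst (l : List Int) : ∀ (ans seen : List Int), seen.Pairwise (fun a b => a ≤ b) →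
    (l.foldl
      (fun (st : List Int × List Int) v =>
        let lo := lowerBound st.2 v 0 st.2.length
        (st.1 ++ [(st.2.length : Int) - (lo : Int)], st.2.insertIdx lo v))
      (ans, seen)).1 = ans ++ resFn seen l := by
  induction l with
  | nil => intro ans seen _; simp [resFn]
  | cons v t ih =>
    intro ans seen hs
    simp only [List.foldl_cons]
    have hlb : lowerBound seen v 0 seen.length = seen.countP (fun x => decide (x < v)) :=
      lowerBound_eq seen v hs 0 seen.length (Nat.zero_le _) List.countP_le_length le_rfl
    rw [hlb, ih _ _ (insertIdx_sorted seen v hs)]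
    rw [resFn_perm t _ _ (List.perm_insertIdx v seen List.countP_le_length)]
    simp only [resFn, count_ge_eq seen v]
    simp

theorem resFn_append (xs : List Int) : ∀ (seen : List Int) (v : Int),
    resFn seen (xs ++ [v]) = resFn seen xs ++ [((xs ++ seen).countP (fun x => decide (v ≤ x)) : Int)] := by
  induction xs with
  | nil => intro seen v; simp [resFn]
  | cons w t ih =>
    intro seen v
    simp only [List.cons_append, resFn, ih (w :: seen) v, List.cons_append]
    have : ((t ++ w :: seen).countP (fun x => decide (v ≤ x))) =
        ((w :: t ++ seen).countP (fun x => decide (v ≤ x))) := by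
      apply List.Perm.countP_congr _ (fun x _ => rfl)
      exact List.perm_middle
    rw [this]
    simp only [List.cons_append]

theorem resFn_rev (l : List Int) : (resFn [] l.reverse).reverse = specFn l := by
  induction l with
  | nil => rfl
  | cons v t ih =>
    simp only [List.reverse_cons, resFn_append, specFn]
    rw [List.reverse_append]
    simp only [List.reverse_singleton, List.singleton_append, ih, List.append_nil,
      List.countP_reverse]

theorem B_eq_spec (prices : List Int) : solution_alt prices = specFn prices := by
  unfold solution_alt
  rw [foldl_fst prices.reverse [] [] (by simp)]
  simpa using resFn_rev prices

theorem count_enum_snd (t : List Int) (s v : Int) :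
    (PySem.List.enumerate t s).countP (fun jx => decide (v ≤ jx.2)) =
      t.countP (fun x => decide (v ≤ x)) := by
  have := List.countP_map (p := fun x : Int => decide (v ≤ x)) (f := fun jx : Int × Int => jx.2)
    (l := PySem.List.enumerate t s)
  rw [PySem.List.map_snd_enumerate] at this
  exact this.symm

-- A's outer map: elements of `pre` have index < s, so the inner count ignores them; the head of
-- enumerate xs s satisfies its own condition, the tail's indices exceed s.
theorem mapA (xs : List Int) : ∀ (s : Int) (pre : List (Int × Int)), (∀ p ∈ pre, p.1 < s) →
    (PySem.List.enumerate xs s).map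
      (fun iv => (-1 : Int) +
        ((pre ++ PySem.List.enumerate xs s).countP
          (fun jx => decide (iv.2 ≤ jx.2 ∧ iv.1 ≤ jx.1)) : Int)) = specFn xs := by
  induction xs with
  | nil => intro s pre _; simp [PySem.List.enumerate_nil, specFn]
  | cons v t ih =>
    intro s pre hpre
    rw [PySem.List.enumerate_cons]
    simp only [List.map_cons, specFn]
    congr 1
    · -- head
      have hc : (pre ++ (s, v) :: PySem.List.enumerate t (s + 1)).countP
          (fun jx => decide (v ≤ jx.2 ∧ s ≤ jx.1)) =
          1 + t.countP (fun x => decide (v ≤ x)) := by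
        rw [List.countP_append, List.countP_cons]
        have h0 : pre.countP (fun jx => decide (v ≤ jx.2 ∧ s ≤ jx.1)) = 0 := by
          rw [List.countP_eq_zero]
          intro p hp
          have := hpre p hp
          simp only [decide_eq_true_eq, not_and]
          intro _; omega
        have h1 : (PySem.List.enumerate t (s + 1)).countP
            (fun jx => decide (v ≤ jx.2 ∧ s ≤ jx.1)) =
            (PySem.List.enumerate t (s + 1)).countP (fun jx => decide (v ≤ jx.2)) := by
          apply List.countP_congr
          intro p hp
          rw [PySem.List.mem_enumerate_iff] at hp
          obtain ⟨k, hk, rfl⟩ := hp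
          simp only [decide_eq_true_eq]
          constructor <;> intro h
          · exact h.1
          · exact ⟨h, by omega⟩
        rw [h0, h1, count_enum_snd]
        simp [Nat.add_comm]
      simp only [hc]
      push_cast
      ring
    · -- tail
      have hre : pre ++ (s, v) :: PySem.List.enumerate t (s + 1) =
          (pre ++ [(s, v)]) ++ PySem.List.enumerate t (s + 1) := by simp
      rw [hre]
      apply ih (s + 1) (pre ++ [(s, v)])
      intro p hp
      rcases List.mem_append.mp hp with h | h
      · have := hpre p h; omega
      · simp at h; subst h; omega

theorem A_eq_spec (prices : List Int) : solution prices = specFn prices := by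
  show (PySem.List.enumerate prices 0).foldl
      (fun answer iv =>
        answer ++ [(PySem.List.enumerate prices 0).foldl
          (fun cnt jx => if iv.2 ≤ jx.2 ∧ iv.1 ≤ jx.1 then cnt + 1 else cnt + 0) (-1 : Int)]) []
    = specFn prices
  have hmap := PySem.List.foldl_append_singleton_eq_map
    (fun iv : Int × Int => (PySem.List.enumerate prices 0).foldl
      (fun cnt jx => if iv.2 ≤ jx.2 ∧ iv.1 ≤ jx.1 then cnt + 1 else cnt + 0) (-1 : Int))
    (PySem.List.enumerate prices 0) []
  rw [hmap]
  simp only [List.nil_append]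
  have hinner : ∀ iv : Int × Int,
      (PySem.List.enumerate prices 0).foldl
        (fun cnt jx => if iv.2 ≤ jx.2 ∧ iv.1 ≤ jx.1 then cnt + 1 else cnt + 0) (-1 : Int) =
      (-1 : Int) + ((PySem.List.enumerate prices 0).countP
        (fun jx => decide (iv.2 ≤ jx.2 ∧ iv.1 ≤ jx.1)) : Int) := by
    intro iv
    have := PySem.List.foldl_count_if (fun jx : Int × Int => decide (iv.2 ≤ jx.2 ∧ iv.1 ≤ jx.1))
      (PySem.List.enumerate prices 0) (-1 : Int)
    simp only [decide_eq_true_eq] at this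
    rw [← this]
    simp
  simp only [hinner]
  have := mapA prices 0 [] (by simp)
  simpa using this

-- ===== VERDICT (by name: the statement is the Claim_ definition above) =====
theorem solution_spec : Claim_equal_solution := by
  intro prices _
  unfold Spec_solution
  rw [A_eq_spec, B_eq_spec]
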